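-- pv_equiv track=rewrite | github.com/ddmin/CodeSnippets | PY/Exercises/python_graded_labs.py | can_balance
-- ===== SOURCE A (Python) =====
-- def can_balance(items):
-- 	for index in range(len(items)):
--
-- 		sumLeft = 0
-- 		sumRight = 0
--
-- 		for n, i in enumerate(items):
-- 			if n < index:
-- 				sumLeft += i * (index - n)
--
-- 			if n > index:
-- 				sumRight += i * (n - index)
--
-- 		if sumLeft == sumRight:
-- 			return index
-- 	return -1
-- ===== SOURCE B (Python) =====
-- def can_balance(items):
--     total = sum(items)
--     right = sum(n * v for n, v in enumerate(items))
--     left = 0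
--     pref = 0
--     for index, v in enumerate(items):
--         if left == right:
--             return index
--         pref += v
--         left += pref
--         right -= total - pref
--     return -1
-- ===== Notes on version B (the rewrite author's own statement) =====
-- stated objective: faster
-- what changed: Instead of recomputing both weighted torque sums from scratch for every candidate index (A's nested loops), B makes a single pass keeping a running prefix sum and updating the left/right torques incrementally in O(1) per index.
import Mathlib
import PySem

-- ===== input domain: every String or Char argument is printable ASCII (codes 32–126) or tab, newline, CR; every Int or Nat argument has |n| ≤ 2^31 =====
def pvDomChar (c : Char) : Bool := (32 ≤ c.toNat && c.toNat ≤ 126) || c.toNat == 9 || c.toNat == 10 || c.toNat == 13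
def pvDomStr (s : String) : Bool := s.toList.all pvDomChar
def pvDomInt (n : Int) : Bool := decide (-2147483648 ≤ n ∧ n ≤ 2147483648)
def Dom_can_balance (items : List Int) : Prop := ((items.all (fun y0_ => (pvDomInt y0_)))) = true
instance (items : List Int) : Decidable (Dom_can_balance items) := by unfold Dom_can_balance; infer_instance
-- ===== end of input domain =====

-- B replaces A's quadratic per-index torque recomputation by one linear pass updating
-- left/right torque and a running prefix sum incrementally (objective: faster, asymptotic).


-- ===== PORT A =====
-- inner 'for n, i in enumerate(items)' loop of A, accumulating (sumLeft, sumRight)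
def canBalInnerA : List (Int × Int) → Int → Int → Int → Int × Int
  | [], _, sl, sr => (sl, sr)
  | (n, i) :: rest, index, sl, sr =>
      canBalInnerA rest index
        (if n < index then sl + i * (index - n) else sl)
        (if n > index then sr + i * (n - index) else sr)

-- outer 'for index in range(len(items))' loop of A, with its early return
def canBalLoopA (items : List Int) : List Int → Int
  | [] => -1
  | index :: rest =>
      let p := canBalInnerA (PySem.List.enumerate items 0) index 0 0
      if p.1 = p.2 then index else canBalLoopA items rest

def can_balance (items : List Int) : Int :=
  canBalLoopA items (PySem.List.pyRange 0 items.length 1)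

-- ===== PORT B =====
-- B's single 'for index, v in enumerate(items)' loop with state (left, right, pref)
def canBalLoopB (total : Int) : List (Int × Int) → Int → Int → Int → Int
  | [], _, _, _ => -1
  | (index, v) :: rest, left, right, pref =>
      if left = right then index
      else canBalLoopB total rest (left + (pref + v)) (right - (total - (pref + v))) (pref + v)

def can_balance_alt (items : List Int) : Int :=
  canBalLoopB items.sum (PySem.List.enumerate items 0) 0
    (((PySem.List.enumerate items 0).map (fun p => p.1 * p.2)).sum) 0

-- ===== PRECONDITION & SPEC =====
def Spec_can_balance (items : List Int) (out : Int) : Prop := out = can_balance_alt items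
instance (items : List Int) (out : Int) : Decidable (Spec_can_balance items out) := by unfold Spec_can_balance; infer_instance

-- ===== CLAIM (what is proved, stated in full; the proofs are below) =====
def Claim_equal_can_balance : Prop := ∀ (items : List Int), Dom_can_balance items → Spec_can_balance items (can_balance items)

-- ===== LEMMAS AND PROOFS =====

-- reference sums over the enumerated list, with general start s
def eL (items : List Int) (s idx : Int) : Int :=
  ((PySem.List.enumerate items s).map (fun p => if p.1 < idx then p.2 * (idx - p.1) else 0)).sum
def eR (items : List Int) (s idx : Int) : Int :=
  ((PySem.List.enumerate items s).map (fun p => if idx < p.1 then p.2 * (p.1 - idx) else 0)).sum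
def eP (items : List Int) (s idx : Int) : Int :=
  ((PySem.List.enumerate items s).map (fun p => if p.1 < idx then p.2 else 0)).sum
def eQ (items : List Int) (s idx : Int) : Int :=
  ((PySem.List.enumerate items s).map (fun p => if p.1 = idx then p.2 else 0)).sum

theorem eL_cons (x : Int) (t : List Int) (s idx : Int) :
    eL (x :: t) s idx = (if s < idx then x * (idx - s) else 0) + eL t (s + 1) idx := by
  simp only [eL, PySem.List.enumerate_cons, List.map_cons, List.sum_cons]

theorem eR_cons (x : Int) (t : List Int) (s idx : Int) :
    eR (x :: t) s idx = (if idx < s then x * (s - idx) else 0) + eR t (s + 1) idx := by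
  simp only [eR, PySem.List.enumerate_cons, List.map_cons, List.sum_cons]

theorem eP_cons (x : Int) (t : List Int) (s idx : Int) :
    eP (x :: t) s idx = (if s < idx then x else 0) + eP t (s + 1) idx := by
  simp only [eP, PySem.List.enumerate_cons, List.map_cons, List.sum_cons]

theorem eQ_cons (x : Int) (t : List Int) (s idx : Int) :
    eQ (x :: t) s idx = (if s = idx then x else 0) + eQ t (s + 1) idx := by
  simp only [eQ, PySem.List.enumerate_cons, List.map_cons, List.sum_cons]

theorem eL_zero (items : List Int) : ∀ s : Int, 0 ≤ s → eL items s 0 = 0 := by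
  induction items with
  | nil => intro s _; simp [eL]
  | cons x t ih =>
      intro s hs
      rw [eL_cons, if_neg (by omega), ih (s + 1) (by omega)]
      ring

theorem eP_zero (items : List Int) : ∀ s : Int, 0 ≤ s → eP items s 0 = 0 := by
  induction items with
  | nil => intro s _; simp [eP]
  | cons x t ih =>
      intro s hs
      rw [eP_cons, if_neg (by omega), ih (s + 1) (by omega)]
      ring

theorem eR_zero_init (items : List Int) : ∀ s : Int, 0 ≤ s →
    ((PySem.List.enumerate items s).map (fun p => p.1 * p.2)).sum = eR items s 0 := by
  induction items with
  | nil => intro s _; simp [eR]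
  | cons x t ih =>
      intro s hs
      simp only [PySem.List.enumerate_cons, List.map_cons, List.sum_cons]
      rw [ih (s + 1) (by omega), eR_cons]
      congr 1
      by_cases h : 0 < s
      · rw [if_pos h]; ring
      · have hs0 : s = 0 := by omega
        subst hs0; simp

theorem innerA_eq (items : List Int) : ∀ (s idx sl sr : Int),
    canBalInnerA (PySem.List.enumerate items s) idx sl sr = (sl + eL items s idx, sr + eR items s idx) := by
  induction items with
  | nil => intro s idx sl sr; simp [canBalInnerA, eL, eR]
  | cons x t ih =>
      intro s idx sl sr
      simp only [PySem.List.enumerate_cons, canBalInnerA]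
      rw [ih, eL_cons, eR_cons]
      simp only [Prod.mk.injEq]
      constructor <;> (split_ifs <;> ring1)

theorem eL_succ (items : List Int) : ∀ (s idx : Int),
    eL items s (idx + 1) = eL items s idx + eP items s (idx + 1) := by
  induction items with
  | nil => intro s idx; simp [eL, eP]
  | cons x t ih =>
      intro s idx
      rw [eL_cons, eL_cons, eP_cons, ih]
      have hhead : (if s < idx + 1 then x * (idx + 1 - s) else 0)
          = (if s < idx then x * (idx - s) else 0) + (if s < idx + 1 then x else 0) := by
        split_ifs with h1 h2 h3
        · ring
        · have hs : s = idx := by omega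
          subst hs; ring
        · exfalso; omega
        · ring
      rw [hhead]; ring

theorem snd_sum_cons (x : Int) (t : List Int) (s : Int) :
    ((PySem.List.enumerate (x :: t) s).map (fun p => p.2)).sum
      = x + ((PySem.List.enumerate t (s + 1)).map (fun p => p.2)).sum := by
  simp only [PySem.List.enumerate_cons, List.map_cons, List.sum_cons]

theorem eR_succ (items : List Int) : ∀ (s idx : Int),
    eR items s idx = eR items s (idx + 1)
      + (((PySem.List.enumerate items s).map (fun p => p.2)).sum - eP items s (idx + 1)) := by
  induction items with
  | nil => intro s idx; simp [eR, eP]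
  | cons x t ih =>
      intro s idx
      rw [eR_cons, eR_cons, eP_cons, snd_sum_cons, ih (s + 1) idx]
      have hhead : (if idx < s then x * (s - idx) else 0)
          = (if idx + 1 < s then x * (s - (idx + 1)) else 0) + (x - (if s < idx + 1 then x else 0)) := by
        by_cases h1 : idx + 1 < s
        · rw [if_pos h1, if_pos (by omega : idx < s), if_neg (by omega : ¬ s < idx + 1)]
          ring
        · by_cases h2 : s < idx + 1
          · rw [if_pos h2, if_neg h1, if_neg (by omega : ¬ idx < s)]
            ring
          · have hs : s = idx + 1 := by omega
            subst hs
            rw [if_pos (by omega : idx < idx + 1), if_neg h1, if_neg h2]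
            ring
      rw [hhead]; ring

theorem eQ_lt (items : List Int) : ∀ (s idx : Int), idx < s → eQ items s idx = 0 := by
  induction items with
  | nil => intro s idx _; simp [eQ]
  | cons x t ih =>
      intro s idx h
      rw [eQ_cons, if_neg (by omega), ih (s + 1) idx (by omega)]
      ring

theorem eQ_eq_getD (items : List Int) : ∀ (k : Nat) (s : Int), eQ items s (s + k) = items.getD k 0 := by
  induction items with
  | nil => intro k s; simp [eQ]
  | cons x t ih =>
      intro k s
      cases k with
      | zero =>
          rw [eQ_cons, Nat.cast_zero, add_zero, if_pos rfl, eQ_lt t (s + 1) s (by omega),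
            List.getD_cons_zero]
          ring
      | succ k' =>
          rw [eQ_cons, if_neg (by push_cast; omega), List.getD_cons_succ]
          have harg : s + ((k' + 1 : Nat) : Int) = s + 1 + (k' : Int) := by push_cast; ring
          rw [harg, ih k' (s + 1)]
          ring

theorem eP_succ (items : List Int) : ∀ (s idx : Int),
    eP items s (idx + 1) = eP items s idx + eQ items s idx := by
  induction items with
  | nil => intro s idx; simp [eP, eQ]
  | cons x t ih =>
      intro s idx
      rw [eP_cons, eP_cons, eQ_cons, ih]
      have hhead : (if s < idx + 1 then x else 0)
          = (if s < idx then x else 0) + (if s = idx then x else 0) := by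
        split_ifs <;> omega
      rw [hhead]; ring

theorem snd_sum_eq (items : List Int) : ∀ s : Int,
    ((PySem.List.enumerate items s).map (fun p => p.2)).sum = items.sum := by
  induction items with
  | nil => intro s; simp
  | cons x t ih =>
      intro s
      rw [snd_sum_cons, ih (s + 1), List.sum_cons]

theorem main_loop (items : List Int) : ∀ (m k : Nat), items.length - k = m → k ≤ items.length →
    canBalLoopB items.sum ((PySem.List.enumerate items 0).drop k) (eL items 0 k) (eR items 0 k) (eP items 0 k)
      = canBalLoopA items (PySem.List.pyRange (k : Int) (items.length : Int) 1) := by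
  intro m
  induction m with
  | zero =>
      intro k hm hk
      have hk' : k = items.length := by omega
      subst hk'
      rw [List.drop_eq_nil_of_le (by simp [PySem.List.length_enumerate])]
      rw [PySem.List.pyRange_one_eq_nil (by omega)]
      simp [canBalLoopA, canBalLoopB]
  | succ m ih =>
      intro k hm hk
      have hklt : k < items.length := by omega
      have hdrop : (PySem.List.enumerate items 0).drop k
          = ((0 : Int) + (k : Int), items[k]) :: (PySem.List.enumerate items 0).drop (k + 1) := by
        rw [List.drop_eq_getElem_cons (by simp [PySem.List.length_enumerate]; omega)]
        congr 1
        exact PySem.List.getElem_enumerate (h := by simp [PySem.List.length_enumerate]; omega)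
      rw [hdrop]
      rw [PySem.List.pyRange_one_cons (by exact_mod_cast hklt)]
      simp only [canBalLoopA, canBalLoopB]
      rw [innerA_eq]
      simp only [zero_add]
      by_cases hbal : eL items 0 (k : Int) = eR items 0 (k : Int)
      · rw [if_pos hbal, if_pos hbal]
      · rw [if_neg hbal, if_neg hbal]
        have hq : eQ items 0 (k : Int) = items[k] := by
          have h1 := eQ_eq_getD items k 0
          rw [List.getD_eq_getElem _ _ hklt] at h1
          simpa using h1
        have hP : eP items 0 (k : Int) + items[k] = eP items 0 ((k : Int) + 1) := by
          rw [eP_succ, hq]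
        have hL : eL items 0 (k : Int) + (eP items 0 (k : Int) + items[k]) = eL items 0 ((k : Int) + 1) := by
          rw [eL_succ, hP]
        have hR : eR items 0 (k : Int) - (items.sum - (eP items 0 (k : Int) + items[k]))
            = eR items 0 ((k : Int) + 1) := by
          rw [hP, eR_succ items 0 (k : Int), snd_sum_eq]
          ring
        rw [hL, hR, hP]
        have hcast : ((k : Int) + 1) = ((k + 1 : Nat) : Int) := by push_cast; ring
        rw [hcast]
        exact ih (k + 1) (by omega) (by omega)

-- ===== VERDICT (by name: the statement is the Claim_ definition above) =====
theorem can_balance_spec : Claim_equal_can_balance := by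
  intro items _
  unfold Spec_can_balance can_balance can_balance_alt
  have h := main_loop items items.length 0 (by omega) (by omega)
  simp only [Nat.cast_zero, List.drop_zero] at h
  rw [eR_zero_init items 0 le_rfl, eL_zero items 0 le_rfl, eP_zero items 0 le_rfl] at *
  exact h.symm
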